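-- pv_equiv track=rewrite | github.com/clifford-christopher/New-CMS | structured_report_builder/section1_builder.py | _get_equity_data
-- ===== SOURCE A (Python) =====
-- def _get_equity_data(company_cv_data):
--     """Get equity capital and number of shares from capital structure"""
--     try:
--         capital_structure = company_cv_data.get('capital_structure', {})
--         if capital_structure:
--             sentences = capital_structure.get('sentence', [])
--
--             equity_capital = None
--             num_shares = None
--
--             for item in sentences:
--                 text = item.get('text', '')
--                 value = item.get('value', '')
--
--                 if text == 'Present Equity Capital':
--                     # Extract value (e.g., "INR 361.81 Cr" -> "₹361.81")
--                     equity_capital = value.replace('INR', '₹').replace(' Cr', '')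
--
--                 elif text == 'Number of Shares':
--                     # Extract value (e.g., "361.81 Cr" -> "361.81")
--                     num_shares = value.replace(' Cr', '')
--
--             return equity_capital, num_shares
--         return None, None
--     except:
--         return None, None
-- ===== SOURCE B (Python) =====
-- def _get_equity_data(company_cv_data):
--     """Get equity capital and number of shares from capital structure"""
--     try:
--         capital_structure = company_cv_data.get('capital_structure', {})
--         if not capital_structure:
--             return None, None
--         sentences = capital_structure.get('sentence', [])
--
--         def last_value(label):
--             # last forward occurrence == first match scanning backwards
--             for item in reversed(sentences):
--                 if item.get('text', '') == label:
--                     return item.get('value', '')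
--             return None
--
--         equity_capital = last_value('Present Equity Capital')
--         if equity_capital is not None:
--             equity_capital = equity_capital.replace('INR', '\u20b9').replace(' Cr', '')
--         num_shares = last_value('Number of Shares')
--         if num_shares is not None:
--             num_shares = num_shares.replace(' Cr', '')
--         return equity_capital, num_shares
--     except:
--         return None, None
-- ===== Notes on version B (the rewrite author's own statement) =====
-- stated objective: alternative
-- what changed: A makes one forward pass threading two mutable result variables through branch updates; B answers each label independently by scanning the sentence list backwards and returning at the first match (equivalent because the last forward occurrence is the first backward one), then applies the replace transforms only to found values.
import Mathlib
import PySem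

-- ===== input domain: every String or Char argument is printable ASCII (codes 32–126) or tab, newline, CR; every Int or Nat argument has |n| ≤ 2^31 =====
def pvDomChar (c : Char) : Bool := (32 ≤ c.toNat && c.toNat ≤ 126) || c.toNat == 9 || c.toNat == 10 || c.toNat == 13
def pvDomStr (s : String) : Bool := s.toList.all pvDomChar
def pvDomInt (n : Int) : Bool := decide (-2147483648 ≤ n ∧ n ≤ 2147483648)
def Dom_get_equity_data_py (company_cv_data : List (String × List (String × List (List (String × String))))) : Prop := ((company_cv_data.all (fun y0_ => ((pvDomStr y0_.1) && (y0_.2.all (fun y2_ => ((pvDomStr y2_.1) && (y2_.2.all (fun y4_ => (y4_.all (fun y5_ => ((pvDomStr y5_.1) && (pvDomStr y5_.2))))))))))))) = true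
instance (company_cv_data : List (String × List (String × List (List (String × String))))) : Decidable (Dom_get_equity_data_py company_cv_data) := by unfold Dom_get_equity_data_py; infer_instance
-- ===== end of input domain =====

-- B replaces A's single forward pass threading two mutable result variables by two independent
-- backward scans with early exit (last forward occurrence = first backward match): alternative, not faster.

-- shared helper: Python's dict.get(k) on an association-list-represented dict (first match)
def pvGet {ν : Type} (d : List (String × ν)) (k : String) : Option ν :=
  (PySem.Dict.mk d).get? k

-- ===== PORT A =====
def get_equity_data_py (company_cv_data : List (String × List (String × List (List (String × String))))) : Option String × Option String :=
  let capital_structure := (pvGet company_cv_data "capital_structure").getD []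
  if capital_structure ≠ [] then
    let sentences := (pvGet capital_structure "sentence").getD []
    sentences.foldl (fun (acc : Option String × Option String) item =>
      let text := (pvGet item "text").getD ""
      let value := (pvGet item "value").getD ""
      if text = "Present Equity Capital" then
        (some (PySem.Str.replace (PySem.Str.replace value "INR" "₹") " Cr" ""), acc.2)
      else if text = "Number of Shares" then
        (acc.1, some (PySem.Str.replace value " Cr" ""))
      else acc) (none, none)
  else (none, none)

-- ===== PORT B =====
-- B's backward scan with early exit: first match in the reversed list
def pvScan (label : String) : List (List (String × String)) → Option String
  | [] => none
  | item :: rest =>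
    if (pvGet item "text").getD "" = label then some ((pvGet item "value").getD "")
    else pvScan label rest

def pvLastValue (sentences : List (List (String × String))) (label : String) : Option String :=
  pvScan label sentences.reverse

def get_equity_data_py_alt (company_cv_data : List (String × List (String × List (List (String × String))))) : Option String × Option String :=
  let capital_structure := (pvGet company_cv_data "capital_structure").getD []
  if capital_structure = [] then (none, none)
  else
    let sentences := (pvGet capital_structure "sentence").getD []
    ((pvLastValue sentences "Present Equity Capital").map
        (fun v => PySem.Str.replace (PySem.Str.replace v "INR" "₹") " Cr" ""),
     (pvLastValue sentences "Number of Shares").map (fun v => PySem.Str.replace v " Cr" ""))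

-- ===== PRECONDITION & SPEC =====
def Spec_get_equity_data_py (company_cv_data : List (String × List (String × List (List (String × String))))) (out : Option String × Option String) : Prop := out = get_equity_data_py_alt company_cv_data
instance (company_cv_data : List (String × List (String × List (List (String × String))))) (out : Option String × Option String) : Decidable (Spec_get_equity_data_py company_cv_data out) := by unfold Spec_get_equity_data_py; infer_instance

-- ===== CLAIM (what is proved, stated in full; the proofs are below) =====
def Claim_equal_get_equity_data_py : Prop := ∀ (company_cv_data : List (String × List (String × List (List (String × String))))), Dom_get_equity_data_py company_cv_data → Spec_get_equity_data_py company_cv_data (get_equity_data_py company_cv_data)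

-- ===== LEMMAS AND PROOFS =====

lemma pvScan_append (label : String) (a b : List (List (String × String))) :
    pvScan label (a ++ b) = ((pvScan label a).elim (pvScan label b) some) := by
  induction a with
  | nil => simp [pvScan]
  | cons i r ih =>
      by_cases h : (pvGet i "text").getD "" = label
      · simp [pvScan, h]
      · simp [pvScan, h, ih]

lemma pvLastValue_cons (label : String) (i : List (String × String))
    (r : List (List (String × String))) :
    pvLastValue (i :: r) label
      = (pvLastValue r label).elim
          (if (pvGet i "text").getD "" = label then some ((pvGet i "value").getD "") else none)
          some := by
  simp [pvLastValue, pvScan_append, pvScan]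

-- loop invariant: A's accumulator after the fold equals B's two backward-scan answers,
-- falling back to the incoming accumulator where no occurrence exists
lemma pv_fold_invariant (sentences : List (List (String × String)))
    (acc : Option String × Option String) :
    sentences.foldl (fun (acc : Option String × Option String) item =>
      let text := (pvGet item "text").getD ""
      let value := (pvGet item "value").getD ""
      if text = "Present Equity Capital" then
        (some (PySem.Str.replace (PySem.Str.replace value "INR" "₹") " Cr" ""), acc.2)
      else if text = "Number of Shares" then
        (acc.1, some (PySem.Str.replace value " Cr" ""))
      else acc) acc
    =
    ((pvLastValue sentences "Present Equity Capital").elim acc.1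
        (fun v => some (PySem.Str.replace (PySem.Str.replace v "INR" "₹") " Cr" "")),
     (pvLastValue sentences "Number of Shares").elim acc.2
        (fun v => some (PySem.Str.replace v " Cr" ""))) := by
  induction sentences generalizing acc with
  | nil => simp [pvLastValue, pvScan]
  | cons item rest ih =>
      simp only [List.foldl_cons, ih, pvLastValue_cons]
      by_cases hp : (pvGet item "text").getD "" = "Present Equity Capital"
      · cases h1 : pvLastValue rest "Present Equity Capital" <;>
        cases h2 : pvLastValue rest "Number of Shares" <;>
        simp [hp]
      · by_cases hn : (pvGet item "text").getD "" = "Number of Shares"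
        · cases h1 : pvLastValue rest "Present Equity Capital" <;>
          cases h2 : pvLastValue rest "Number of Shares" <;>
          simp [hn]
        · cases h1 : pvLastValue rest "Present Equity Capital" <;>
          cases h2 : pvLastValue rest "Number of Shares" <;>
          simp [hp, hn]

-- ===== VERDICT (by name: the statement is the Claim_ definition above) =====
theorem get_equity_data_py_spec : Claim_equal_get_equity_data_py := by
  intro cv _
  unfold Spec_get_equity_data_py get_equity_data_py get_equity_data_py_alt
  by_cases h : (pvGet cv "capital_structure").getD [] = []
  · simp [h]
  · simp only [h, ne_eq, not_false_iff, if_true]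
    rw [pv_fold_invariant]
    cases h1 : pvLastValue ((pvGet ((pvGet cv "capital_structure").getD []) "sentence").getD []) "Present Equity Capital" <;>
    cases h2 : pvLastValue ((pvGet ((pvGet cv "capital_structure").getD []) "sentence").getD []) "Number of Shares" <;>
    simp
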